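-- pv_equiv track=rewrite | github.com/joonion/boj | Chap.22.스택/3986.좋은단어/solve.py | goodword
-- ===== SOURCE A (Python) =====
-- def goodword(word):
--     stack = []
--     for w in word:
--         if len(stack) > 0 and w == stack[-1]:
--             stack.pop()
--         else:
--             stack.append(w)
--     return len(stack) == 0
-- ===== SOURCE B (Python) =====
-- def goodword(word):
--     s = list(word)
--     while True:
--         for i in range(len(s) - 1):
--             if s[i] == s[i + 1]:
--                 del s[i:i + 2]
--                 break
--         else:
--             return len(s) == 0
-- ===== Notes on version B (the rewrite author's own statement) =====
-- stated objective: alternative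
-- what changed: replaces the single left-to-right stack pass by a repeated-collapse fixpoint: scan for the first adjacent equal pair, delete it, restart until no pair remains, then test emptiness
import Mathlib
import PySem

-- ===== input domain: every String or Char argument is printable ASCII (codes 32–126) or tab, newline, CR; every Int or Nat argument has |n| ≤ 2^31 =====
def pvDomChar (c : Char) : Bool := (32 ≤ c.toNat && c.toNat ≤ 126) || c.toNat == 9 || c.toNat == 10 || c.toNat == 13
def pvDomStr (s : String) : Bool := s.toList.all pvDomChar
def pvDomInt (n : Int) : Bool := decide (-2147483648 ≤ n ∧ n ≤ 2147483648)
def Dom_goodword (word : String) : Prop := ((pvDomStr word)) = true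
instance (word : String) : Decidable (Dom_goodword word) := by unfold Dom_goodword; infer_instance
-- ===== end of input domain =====

-- B replaces A's single stack pass by a repeated-collapse fixpoint (delete the first
-- adjacent equal pair, restart until none remains); objective: alternative algorithm.

-- ===== PORT A =====
-- one loop step: stack non-empty and w equals the top → pop, else push
def goodwordStep (stack : List Char) (w : Char) : List Char :=
  match stack with
  | top :: rest => if w = top then rest else w :: top :: rest
  | [] => [w]

def goodword (word : String) : Bool :=
  decide ((word.toList.foldl goodwordStep []).length = 0)

-- ===== PORT B =====
-- delete the first adjacent equal pair, `none` if there is none (Source B's inner for-loop)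
def delPair : List Char → Option (List Char)
  | a :: b :: t => if a = b then some t else (delPair (b :: t)).map (a :: ·)
  | _ => none

theorem delPair_length : ∀ {s t : List Char}, delPair s = some t → t.length < s.length
  | a :: b :: r, t, h => by
    rw [delPair] at h
    split_ifs at h with hab
    · cases h; simp
    · cases hm : delPair (b :: r) with
      | none => rw [hm] at h; simp at h
      | some t' =>
        rw [hm] at h
        simp at h
        subst h
        have := delPair_length hm
        simpa using Nat.succ_lt_succ this

-- Source B's outer while-loop: collapse until no adjacent equal pair remains
def collapse (s : List Char) : List Char :=
  match _h : delPair s with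
  | some t => collapse t
  | none => s
termination_by s.length
decreasing_by exact delPair_length _h

def goodword_alt (word : String) : Bool := (collapse word.toList).isEmpty

-- ===== PRECONDITION & SPEC =====
def Spec_goodword (word : String) (out : Bool) : Prop := out = goodword_alt word
instance (word : String) (out : Bool) : Decidable (Spec_goodword word out) := by unfold Spec_goodword; infer_instance

-- ===== CLAIM (what is proved, stated in full; the proofs are below) =====
def Claim_equal_goodword : Prop := ∀ (word : String), Dom_goodword word → Spec_goodword word (goodword word)

-- ===== LEMMAS AND PROOFS =====

-- A's stack never contains two adjacent equal characters
theorem goodwordStep_chain {st : List Char} (h : List.IsChain (· ≠ ·) st) (c : Char) :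
    List.IsChain (· ≠ ·) (goodwordStep st c) := by
  match st with
  | [] => simp [goodwordStep]
  | top :: rest =>
    simp only [goodwordStep]
    split_ifs with hc
    · exact h.tail
    · exact List.isChain_cons_cons.mpr ⟨hc, h⟩

-- processing two equal characters is the identity on an adjacent-distinct stack
theorem step_pair {st : List Char} (h : List.IsChain (· ≠ ·) st) (c : Char) :
    goodwordStep (goodwordStep st c) c = st := by
  match st with
  | [] => simp [goodwordStep]
  | top :: rest =>
    simp only [goodwordStep]
    split_ifs with hc
    · subst hc
      match rest with
      | [] => simp
      | r :: _ =>
        have hne : c ≠ r := (List.isChain_cons_cons.mp h).1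
        simp [hne]
    · simp

-- deleting the first adjacent equal pair does not change A's fold
theorem foldl_delPair : ∀ {s t : List Char}, delPair s = some t →
    ∀ st : List Char, List.IsChain (· ≠ ·) st →
      s.foldl goodwordStep st = t.foldl goodwordStep st
  | a :: b :: r, t, h => by
    intro st hst
    rw [delPair] at h
    split_ifs at h with hab
    · cases h
      subst hab
      simp [List.foldl, step_pair hst]
    · cases hm : delPair (b :: r) with
      | none => rw [hm] at h; simp at h
      | some t' =>
        rw [hm] at h
        simp at h
        subst h
        simp only [List.foldl]
        exact foldl_delPair hm (goodwordStep st a) (goodwordStep_chain hst a)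

-- a pair-free list folds to its own reverse (everything is pushed)
theorem delPair_none_chain : ∀ {s : List Char}, delPair s = none → List.IsChain (· ≠ ·) s
  | [] , _ => List.isChain_nil
  | [a], _ => List.IsChain.singleton a
  | a :: b :: r, h => by
    rw [delPair] at h
    split_ifs at h with hab
    · cases hm : delPair (b :: r) with
      | some t' => rw [hm] at h; simp at h
      | none => exact List.isChain_cons_cons.mpr ⟨hab, delPair_none_chain hm⟩

theorem foldl_chain_reverse : ∀ (l st : List Char),
    List.IsChain (· ≠ ·) (l.reverse ++ st) →
      l.foldl goodwordStep st = l.reverse ++ st := by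
  intro l
  induction l with
  | nil => intro st h; simp
  | cons c t ih =>
    intro st h
    have hpush : goodwordStep st c = c :: st := by
      match st with
      | [] => simp [goodwordStep]
      | top :: rest =>
        have hc : c ≠ top := by
          have h2 : List.IsChain (· ≠ ·) (t.reverse ++ c :: top :: rest) := by
            simpa using h
          exact (List.isChain_append_cons_cons.mp h2).2.1
        simp [goodwordStep, hc]
    simp only [List.foldl, hpush]
    have h' : List.IsChain (· ≠ ·) (t.reverse ++ c :: st) := by simpa using h
    rw [ih (c :: st) h']
    simp

theorem foldl_eq_collapse_reverse : ∀ (s : List Char),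
    s.foldl goodwordStep [] = (collapse s).reverse := by
  intro s
  induction hn : s.length using Nat.strong_induction_on generalizing s with
  | _ n ih =>
    rw [collapse]
    cases hm : delPair s with
    | some t =>
      rw [foldl_delPair hm [] List.isChain_nil]
      exact ih t.length (hn ▸ delPair_length hm) t rfl
    | none =>
      have := foldl_chain_reverse s []
      simp only [List.append_nil] at this
      exact this (List.isChain_reverse.mpr ((delPair_none_chain hm).imp fun {_ _} h => Ne.symm h))

-- ===== VERDICT (by name: the statement is the Claim_ definition above) =====
theorem goodword_spec : Claim_equal_goodword := by
  intro word _
  unfold Spec_goodword goodword goodword_alt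
  rw [foldl_eq_collapse_reverse]
  cases collapse word.toList <;> simp
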